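-- pv_equiv track=rewrite | github.com/geomagpy/MARTAS | martas/app/threshold.py | assign_parameterlist
-- ===== SOURCE A (Python) =====
-- def assign_parameterlist(namelist=None,confdict=None):
--     """
--     DESCRIPTION:
--         assign the threshold parameters to a dictionary
--     EXAMPLE:
--         para = assign_parameterlist(sp.valuenamelist,conf)
--     """
--     if not namelist:
--         namelist = []
--     if not confdict:
--         confdict = {}
--     para = {}
--     for i in range(1,9999):
--         valuedict = {}
--         valuelist = confdict.get(str(i),[])
--         if len(valuelist) > 0:
--             if not len(valuelist) in [len(namelist), len(namelist)-1, len(namelist)-2]: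
--                 # check whether all values (except the two optional ones are present)
--                 print ("PARAMETER: provided values differ from the expected amount - please check")
--             else:
--                 for idx,val in enumerate(valuelist):
--                     valuedict[namelist[idx]] = val.strip()
--                 para[str(i)] = valuedict
--     return para
-- ===== SOURCE B (Python) =====
-- def _parse_index(k):
--     # the unique n with 1 <= n <= 9998 and str(n) == k, else None
--     n = 0
--     for c in k:
--         if not ('0' <= c <= '9'):
--             return None
--         n = 10 * n + (ord(c) - 48)
--         if n > 9998:
--             return None
--     if n == 0 or k[0] == '0':
--         return None
--     return n
--
--
-- def assign_parameterlist(namelist=None, confdict=None):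
--     if not namelist:
--         namelist = []
--     if not confdict:
--         confdict = {}
--     entries = []
--     for k, valuelist in confdict.items():
--         n = _parse_index(k)
--         if n is None or len(valuelist) == 0:
--             continue
--         if len(valuelist) in (len(namelist), len(namelist) - 1, len(namelist) - 2):
--             entries.append((n, k, dict(zip(namelist, (v.strip() for v in valuelist)))))
--         else:
--             print("PARAMETER: provided values differ from the expected amount - please check")
--     entries.sort(key=lambda e: e[0])
--     return {k: d for _, k, d in entries}
-- ===== Notes on version B (the rewrite author's own statement) =====
-- stated objective: alternative
-- what changed: Instead of probing the dict 9998 times with str(i) and accumulating into a dict, B makes one pass over the dict's own items, parses each key with an explicit decimal parser into its index n (rejecting non-digits, leading zeros and n outside 1..9998), collects (n, key, sub-dict) triples for the accepted entries, sorts the triples by n, and emits the result from that sorted list.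
import Mathlib
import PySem

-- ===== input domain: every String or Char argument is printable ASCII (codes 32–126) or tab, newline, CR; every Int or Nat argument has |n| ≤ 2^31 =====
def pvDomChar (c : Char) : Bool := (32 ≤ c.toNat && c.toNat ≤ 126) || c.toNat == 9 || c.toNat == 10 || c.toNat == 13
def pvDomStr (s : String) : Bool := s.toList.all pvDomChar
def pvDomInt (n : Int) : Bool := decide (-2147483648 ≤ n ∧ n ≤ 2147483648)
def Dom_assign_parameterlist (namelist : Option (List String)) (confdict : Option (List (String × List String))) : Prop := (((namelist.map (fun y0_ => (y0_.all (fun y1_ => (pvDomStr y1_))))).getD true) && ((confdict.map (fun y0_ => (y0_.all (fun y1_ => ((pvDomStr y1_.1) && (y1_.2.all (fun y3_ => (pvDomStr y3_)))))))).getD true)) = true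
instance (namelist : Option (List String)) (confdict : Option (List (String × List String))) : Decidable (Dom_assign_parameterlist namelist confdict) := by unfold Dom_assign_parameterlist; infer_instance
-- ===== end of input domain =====

-- B replaces A's scan of the whole index space 1..9998 (one dict probe per index) by a single
-- pass over the dict's own items with an explicit decimal key parser, collecting triples and
-- sorting them by the parsed index; return value only (A's print on a bad value count is a
-- console side effect reproduced by B).

-- ===== PORT A =====
def assign_parameterlist (namelist : Option (List String)) (confdict : Option (List (String × List String))) : List (String × List (String × String)) :=
  let nl := namelist.getD []
  let cd : PySem.Dict String (List String) := PySem.Dict.mk (confdict.getD [])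
  let para := (PySem.List.pyRange 1 9999 1).foldl (fun para i =>
    let valuelist := PySem.Dict.getD cd (PySem.Int.toStr i) []
    if valuelist.length > 0 then
      if !([(nl.length : Int), (nl.length : Int) - 1, (nl.length : Int) - 2].contains (valuelist.length : Int)) then
        para  -- the Python prints a warning here; the dict is unchanged
      else
        let valuedict := (PySem.List.enumerate valuelist).foldl
          (fun vd p => PySem.Dict.insert vd (PySem.List.pyGetD nl p.1 "") (PySem.Str.strip p.2))
          (PySem.Dict.empty)
        PySem.Dict.insert para (PySem.Int.toStr i) valuedict
    else para) (PySem.Dict.empty)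
  para.items.map (fun p => (p.1, p.2.items))

-- ===== PORT B =====
-- Source B's _parse_index: explicit decimal parse of k; the loop aborts on a non-digit or once the
-- accumulator exceeds 9998, and the result is rejected for 0 or a leading '0'.
def pvParseLoop : List Char → Int → Option Int
  | [], n => some n
  | c :: cs, n =>
    if decide ('0' ≤ c) && decide (c ≤ '9') then
      let n' := 10 * n + ((c.toNat : Int) - 48)
      if n' > 9998 then none else pvParseLoop cs n'
    else none

def pvParseIndex (k : String) : Option Int :=
  match pvParseLoop k.toList 0 with
  | none => none
  | some n => if n == 0 || (k.toList.headD ' ' == '0') then none else some n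

-- confdict.items() of Source B: the dict's unique keys in insertion order, each with its value
def pvItems (cd0 : List (String × List String)) : List (String × List String) :=
  (PySem.List.dedup (cd0.map Prod.fst)).map (fun k => (k, PySem.Dict.getD (PySem.Dict.mk cd0) k []))

def assign_parameterlist_alt (namelist : Option (List String)) (confdict : Option (List (String × List String))) : List (String × List (String × String)) :=
  let nl := namelist.getD []
  let cd0 := confdict.getD []
  let entries : List (Int × String × PySem.Dict String String) := (pvItems cd0).foldl (fun acc p =>
    match pvParseIndex p.1 with
    | none => acc
    | some n =>
      if p.2.length = 0 then acc
      else if [(nl.length : Int), (nl.length : Int) - 1, (nl.length : Int) - 2].contains ((p.2.length : Int)) then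
        acc ++ [(n, p.1, PySem.Dict.ofList (nl.zip (p.2.map PySem.Str.strip)))]
      else acc  -- print branch of Source B
    ) []
  (PySem.List.sorted entries (fun e => e.1)).map (fun e => (e.2.1, e.2.2.items))

-- ===== PRECONDITION & SPEC =====
def Spec_assign_parameterlist (namelist : Option (List String)) (confdict : Option (List (String × List String))) (out : List (String × List (String × String))) : Prop := out = assign_parameterlist_alt namelist confdict
instance (namelist : Option (List String)) (confdict : Option (List (String × List String))) (out : List (String × List (String × String))) : Decidable (Spec_assign_parameterlist namelist confdict out) := by unfold Spec_assign_parameterlist; infer_instance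

-- ===== CLAIM (what is proved, stated in full; the proofs are below) =====
def Claim_equal_assign_parameterlist : Prop := ∀ (namelist : Option (List String)) (confdict : Option (List (String × List String))), Dom_assign_parameterlist namelist confdict → Spec_assign_parameterlist namelist confdict (assign_parameterlist namelist confdict)

-- ===== LEMMAS AND PROOFS =====

def pvHorner (ds : List Char) : Nat := ds.foldl (fun a c => 10 * a + (c.toNat - 48)) 0
theorem pvChar_eq_of_toNat {c d : Char} (h : c.toNat = d.toNat) : c = d := by
  apply Char.ext; apply UInt32.toNat_inj.mp; exact h
theorem pvDigitChar_toNat {d : Nat} (h : d < 10) : (Nat.digitChar d).toNat = 48 + d := by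
  interval_cases d <;> decide
theorem pvDigitChar_isdigit {d : Nat} (h : d < 10) : PySem.Chars.isdigit (Nat.digitChar d) = true := by
  interval_cases d <;> decide
theorem pvDigitChar_ne_zero {d : Nat} (h0 : 0 < d) (h : d < 10) : Nat.digitChar d ≠ '0' := by
  interval_cases d <;> decide
theorem pvIsdigit_toNat {c : Char} (h : PySem.Chars.isdigit c = true) : 48 ≤ c.toNat ∧ c.toNat ≤ 57 := by
  simp only [PySem.Chars.isdigit, Bool.and_eq_true, decide_eq_true_eq, Char.le_def] at h
  exact ⟨h.1, h.2⟩
theorem pvDigitChar_roundtrip {c : Char} (h : PySem.Chars.isdigit c = true) :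
    Nat.digitChar (c.toNat - 48) = c := by
  obtain ⟨h1, h2⟩ := pvIsdigit_toNat h
  apply pvChar_eq_of_toNat
  rw [pvDigitChar_toNat (by omega)]
  omega
theorem pvDigitBool (c : Char) : (decide ('0' ≤ c) && decide (c ≤ '9')) = PySem.Chars.isdigit c := by
  simp [PySem.Chars.isdigit, Char.le_def]
theorem pvHorner_append (ds : List Char) (c : Char) :
    pvHorner (ds ++ [c]) = 10 * pvHorner ds + (c.toNat - 48) := by
  simp [pvHorner, List.foldl_append]
theorem pvHorner_acc (ds : List Char) : ∀ (a : Nat),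
    ds.foldl (fun a c => 10 * a + (c.toNat - 48)) a = a * 10 ^ ds.length + pvHorner ds := by
  induction ds with
  | nil => intro a; simp [pvHorner]
  | cons c cs ih =>
    intro a
    have hc : pvHorner (c :: cs) = (c.toNat - 48) * 10 ^ cs.length + pvHorner cs := by
      simpa [pvHorner] using ih (c.toNat - 48)
    simp only [List.foldl_cons, List.length_cons, hc]
    rw [ih (10 * a + (c.toNat - 48))]
    ring
theorem pvHorner_cons (c : Char) (cs : List Char) :
    pvHorner (c :: cs) = (c.toNat - 48) * 10 ^ cs.length + pvHorner cs := by
  have := pvHorner_acc cs (c.toNat - 48)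
  simpa [pvHorner] using this
theorem pvHorner_pos {c : Char} {cs : List Char} (hd : PySem.Chars.isdigit c = true)
    (h0 : c ≠ '0') : 1 ≤ pvHorner (c :: cs) := by
  have h9 := pvIsdigit_toNat hd
  have hne : c.toNat ≠ 48 := fun h => h0 (pvChar_eq_of_toNat (by rw [h]; decide))
  rw [pvHorner_cons]
  have : 1 ≤ 10 ^ cs.length := Nat.one_le_pow _ _ (by norm_num)
  have : 1 * 10 ^ cs.length ≤ (c.toNat - 48) * 10 ^ cs.length :=
    Nat.mul_le_mul_right _ (by omega)
  omega
theorem pvTdcAppend (f : Nat) : ∀ (n : Nat) (ds : List Char),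
    Nat.toDigitsCore 10 f n ds = Nat.toDigitsCore 10 f n [] ++ ds := by
  induction f with
  | zero => intro n ds; simp [Nat.toDigitsCore]
  | succ f ih =>
    intro n ds
    simp only [Nat.toDigitsCore]
    by_cases h : n / 10 = 0
    · simp [h]
    · simp only [h, if_false]
      rw [ih (n / 10) (Nat.digitChar (n % 10) :: ds), ih (n / 10) [Nat.digitChar (n % 10)]]
      simp
theorem pvTdcFuel : ∀ (f g n : Nat) (ds : List Char), n < f → n < g →
    Nat.toDigitsCore 10 f n ds = Nat.toDigitsCore 10 g n ds := by
  intro f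
  induction f with
  | zero => intro g n ds hf; omega
  | succ f ih =>
    intro g n ds hf hg
    cases g with
    | zero => omega
    | succ g =>
      simp only [Nat.toDigitsCore]
      by_cases h : n / 10 = 0
      · simp [h]
      · simp only [h, if_false]
        exact ih g (n / 10) _ (by omega) (by omega)
theorem pvTdSmall {n : Nat} (h : n < 10) : Nat.toDigits 10 n = [Nat.digitChar n] := by
  unfold Nat.toDigits
  simp only [Nat.toDigitsCore]
  have : n / 10 = 0 := Nat.div_eq_of_lt h
  simp [this, Nat.mod_eq_of_lt h]
theorem pvTdStep {n : Nat} (h : 10 ≤ n) :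
    Nat.toDigits 10 n = Nat.toDigits 10 (n / 10) ++ [Nat.digitChar (n % 10)] := by
  unfold Nat.toDigits
  conv_lhs => rw [show n + 1 = (n) + 1 from rfl]
  simp only [Nat.toDigitsCore]
  have h0 : ¬ n / 10 = 0 := by omega
  simp only [h0, if_false]
  rw [pvTdcAppend]
  congr 1
  exact pvTdcFuel n (n / 10 + 1) (n / 10) [] (by omega) (by omega)
theorem pvTdMain (n : Nat) :
    (Nat.toDigits 10 n).all PySem.Chars.isdigit = true ∧ pvHorner (Nat.toDigits 10 n) = n ∧
      ∃ c cs, Nat.toDigits 10 n = c :: cs ∧ (0 < n → c ≠ '0') := by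
  induction n using Nat.strong_induction_on with
  | _ n ih =>
    by_cases h : n < 10
    · rw [pvTdSmall h]
      refine ⟨by simp [pvDigitChar_isdigit h], ?_, Nat.digitChar n, [], rfl, fun h0 => pvDigitChar_ne_zero h0 h⟩
      rw [show [Nat.digitChar n] = [] ++ [Nat.digitChar n] from rfl, pvHorner_append]
      simp [pvHorner, pvDigitChar_toNat h]
    · rw [Nat.not_lt] at h
      obtain ⟨ha, hh, c, cs, hc, h0⟩ := ih (n / 10) (by omega)
      rw [pvTdStep h]
      refine ⟨?_, ?_, c, cs ++ [Nat.digitChar (n % 10)], by rw [hc]; simp, fun _ => h0 (by omega)⟩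
      · simp only [List.all_append, ha, Bool.true_and, List.all_cons, List.all_nil, Bool.and_true]
        exact pvDigitChar_isdigit (Nat.mod_lt _ (by norm_num))
      · rw [pvHorner_append, hh, pvDigitChar_toNat (Nat.mod_lt _ (by norm_num))]
        omega
theorem pvTdInv : ∀ (ds : List Char), ds.all PySem.Chars.isdigit = true →
    (∀ c cs, ds = c :: cs → c ≠ '0') → ds ≠ [] → Nat.toDigits 10 (pvHorner ds) = ds := by
  intro ds
  induction ds using List.reverseRecOn with
  | nil => intro _ _ h; exact absurd rfl h
  | append_singleton ds c ih =>
    intro hall hhead _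
    simp only [List.all_append, List.all_cons, List.all_nil, Bool.and_eq_true, Bool.and_true] at hall
    rw [pvHorner_append]
    rcases ds with _ | ⟨d, ds'⟩
    · have h9 := pvIsdigit_toNat hall.2
      simp only [pvHorner, List.foldl_nil, Nat.mul_zero, Nat.zero_add]
      rw [pvTdSmall (by omega)]
      rw [pvDigitChar_roundtrip hall.2]
      simp
    · have hd : d ≠ '0' := hhead d (ds' ++ [c]) (by simp)
      have hpos : 1 ≤ pvHorner (d :: ds') := pvHorner_pos (by simp_all) hd
      have h9 := pvIsdigit_toNat hall.2
      have h10 : 10 ≤ 10 * pvHorner (d :: ds') + (c.toNat - 48) := by omega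
      rw [pvTdStep h10]
      have hdiv : (10 * pvHorner (d :: ds') + (c.toNat - 48)) / 10 = pvHorner (d :: ds') := by omega
      have hmod : (10 * pvHorner (d :: ds') + (c.toNat - 48)) % 10 = c.toNat - 48 := by omega
      rw [hdiv, hmod, ih hall.1 (fun e es he => hhead e (es ++ [c]) (by rw [he]; simp)) (by simp),
        pvDigitChar_roundtrip hall.2]
theorem pvToChars_eq (n : Nat) : PySem.Int.toChars (n : Int) = Nat.toDigits 10 n := by
  simp [PySem.Int.toChars]
theorem pvToStrProps (n : Nat) (h1 : 1 ≤ n) (h2 : n ≤ 9998) :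
    (PySem.Int.toStr (n : Int)).toList.all PySem.Chars.isdigit = true ∧
    pvHorner (PySem.Int.toStr (n : Int)).toList = n ∧
    ∃ c cs, (PySem.Int.toStr (n : Int)).toList = c :: cs ∧ c ≠ '0' := by
  rw [PySem.Int.toList_toStr, pvToChars_eq]
  obtain ⟨ha, hh, c, cs, hc, h0⟩ := pvTdMain n
  exact ⟨ha, hh, c, cs, hc, h0 h1⟩
theorem pvFoldMono (ds : List Char) : ∀ (a : Nat), ds.all PySem.Chars.isdigit = true →
    a ≤ ds.foldl (fun a c => 10 * a + (c.toNat - 48)) a := by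
  induction ds with
  | nil => intro a _; simp
  | cons c cs ih =>
    intro a h
    simp only [List.all_cons, Bool.and_eq_true] at h
    simp only [List.foldl_cons]
    exact le_trans (by omega) (ih (10 * a + (c.toNat - 48)) h.2)
theorem pvLoopSound (ds : List Char) : ∀ (a : Nat) (n : Int), a ≤ 9998 →
    pvParseLoop ds (a : Int) = some n →
    ds.all PySem.Chars.isdigit = true ∧
      n = ((ds.foldl (fun a c => 10 * a + (c.toNat - 48)) a : Nat) : Int) ∧ n ≤ 9998 := by
  induction ds with
  | nil =>
    intro a n ha h
    simp only [pvParseLoop, Option.some.injEq] at h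
    refine ⟨rfl, ?_, ?_⟩ <;> simp [← h] <;> exact_mod_cast (by exact_mod_cast ha : (a : Int) ≤ 9998)
  | cons c cs ih =>
    intro a n ha h
    simp only [pvParseLoop] at h
    by_cases hd : (decide ('0' ≤ c) && decide (c ≤ '9')) = true
    · rw [hd] at h
      simp only [if_true] at h
      have hdig : PySem.Chars.isdigit c = true := by rw [← pvDigitBool]; exact hd
      have h48 := pvIsdigit_toNat hdig
      by_cases hb : (10 * (a : Int) + ((c.toNat : Int) - 48)) > 9998
      · simp only [hb, if_true] at h; exact absurd h (by simp)
      · simp only [hb, if_false] at h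
        have hcast : (10 : Int) * (a : Int) + ((c.toNat : Int) - 48) = ((10 * a + (c.toNat - 48) : Nat) : Int) := by
          push_cast; omega
        rw [hcast] at h
        have hle : 10 * a + (c.toNat - 48) ≤ 9998 := by
          rw [hcast] at hb; exact_mod_cast not_lt.mp hb
        obtain ⟨h1, h2, h3⟩ := ih _ n hle h
        exact ⟨by simp [hdig, h1], by simpa using h2, h3⟩
    · rw [Bool.not_eq_true] at hd
      rw [hd] at h
      exact absurd h (by simp)
theorem pvLoopComplete (ds : List Char) : ∀ (a : Nat), ds.all PySem.Chars.isdigit = true →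
    ds.foldl (fun a c => 10 * a + (c.toNat - 48)) a ≤ 9998 →
    pvParseLoop ds (a : Int) = some ((ds.foldl (fun a c => 10 * a + (c.toNat - 48)) a : Nat) : Int) := by
  induction ds with
  | nil => intro a _ _; simp [pvParseLoop]
  | cons c cs ih =>
    intro a h hb
    simp only [List.all_cons, Bool.and_eq_true] at h
    have h48 := pvIsdigit_toNat h.1
    simp only [pvParseLoop, pvDigitBool, h.1, if_true]
    simp only [List.foldl_cons] at hb ⊢
    have hstep : 10 * a + (c.toNat - 48) ≤ 9998 :=
      le_trans (pvFoldMono cs _ h.2) hb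
    have hcast : (10 : Int) * (a : Int) + ((c.toNat : Int) - 48) = ((10 * a + (c.toNat - 48) : Nat) : Int) := by
      push_cast; omega
    have hnb : ¬ ((10 : Int) * (a : Int) + ((c.toNat : Int) - 48) > 9998) := by
      rw [hcast]; exact_mod_cast not_lt.mpr (by exact_mod_cast hstep)
    rw [if_neg hnb, hcast]
    exact ih _ h.2 hb
-- the characterisation of Source B's key parser: it accepts exactly the strings str(n), 1 ≤ n ≤ 9998
theorem pvParseIff (k : String) (n : Int) :
    pvParseIndex k = some n ↔ 1 ≤ n ∧ n ≤ 9998 ∧ PySem.Int.toStr n = k := by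
  constructor
  · intro h
    unfold pvParseIndex at h
    rcases hl : pvParseLoop k.toList 0 with _ | m
    · rw [hl] at h; exact absurd h (by simp)
    · rw [hl] at h
      dsimp only at h
      by_cases hg : (m == 0 || (k.toList.headD ' ' == '0')) = true
      · rw [if_pos hg] at h; exact absurd h (by simp)
      · rw [if_neg hg] at h
        have hmn : m = n := by simpa using h
        simp only [Bool.or_eq_true, not_or, beq_iff_eq] at hg
        have hl0 : pvParseLoop k.toList ((0 : Nat) : Int) = some n := by
          rw [← hmn]; simpa using hl
        obtain ⟨hdig, hval, hle⟩ := pvLoopSound k.toList 0 n (by omega) hl0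
        have hh : n = ((pvHorner k.toList : Nat) : Int) := by simpa [pvHorner] using hval
        have hpos : n ≠ 0 := fun hz => hg.1 (by rw [hmn, hz])
        have h1 : 1 ≤ pvHorner k.toList := by
          rcases Nat.eq_zero_or_pos (pvHorner k.toList) with h0 | h0
          · exact absurd (by rw [hh, h0]; rfl) hpos
          · omega
        rcases hk : k.toList with _ | ⟨c, cs⟩
        · rw [hk] at hh; simp [pvHorner] at hh; exact absurd hh hpos
        · have hc0 : c ≠ '0' := by
            intro hc; apply hg.2; rw [hk, hc]; rfl
          rw [hk] at hdig hh h1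
          refine ⟨by rw [hh]; exact_mod_cast h1, hle, ?_⟩
          have hinv := pvTdInv (c :: cs) hdig (by rintro e es ⟨rfl, rfl⟩; exact hc0) (by simp)
          rw [hh]
          apply String.toList_inj.mp
          rw [PySem.Int.toList_toStr, pvToChars_eq, hinv, hk]
  · rintro ⟨h1, h2, rfl⟩
    obtain ⟨m, rfl⟩ : ∃ m : Nat, (m : Int) = n := ⟨n.toNat, by omega⟩
    have h1' : 1 ≤ m := by exact_mod_cast h1
    have h2' : m ≤ 9998 := by exact_mod_cast h2
    obtain ⟨hdig, hh, c, cs, hc, hc0⟩ := pvToStrProps m h1' h2'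
    unfold pvParseIndex
    have hfold : (PySem.Int.toStr (m : Int)).toList.foldl (fun a c => 10 * a + (c.toNat - 48)) 0 = m := by
      simpa [pvHorner] using hh
    have := pvLoopComplete (PySem.Int.toStr (m : Int)).toList 0 hdig (by rw [hfold]; omega)
    rw [show ((0 : Nat) : Int) = (0 : Int) by norm_num, hfold] at this
    rw [this]
    dsimp only
    have hg : ¬ ((((m : Int) == 0) || ((PySem.Int.toStr (m : Int)).toList.headD ' ' == '0')) = true) := by
      simp only [Bool.or_eq_true, not_or, beq_iff_eq]
      constructor
      · exact_mod_cast (by omega : (m : Int) ≠ 0)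
      · rw [hc]; simpa using hc0
    rw [if_neg hg]
theorem pvToStrInj {a b : Int} (h1 : 1 ≤ a) (h2 : a ≤ 9998) (h3 : 1 ≤ b) (h4 : b ≤ 9998)
    (h : PySem.Int.toStr a = PySem.Int.toStr b) : a = b := by
  have ha : pvParseIndex (PySem.Int.toStr a) = some a := (pvParseIff _ _).mpr ⟨h1, h2, rfl⟩
  have hb : pvParseIndex (PySem.Int.toStr b) = some b := (pvParseIff _ _).mpr ⟨h3, h4, rfl⟩
  rw [h, hb] at ha
  exact (Option.some.injEq _ _ ▸ ha).symm
theorem pvGetIsSome (cd0 : List (String × List String)) (k : String) :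
    ((PySem.Dict.mk cd0).get? k).isSome = true ↔ k ∈ cd0.map Prod.fst := by
  induction cd0 with
  | nil => simp [PySem.Dict.get?]
  | cons p rest ih =>
    rw [show (PySem.Dict.mk (p :: rest)) = { items := (p.1, p.2) :: rest } from rfl,
      PySem.Dict.get?_mk_cons]
    by_cases h : p.1 == k
    · simp [eq_of_beq h]
    · simp only [h, Bool.false_eq_true, if_false, List.map_cons, List.mem_cons]
      rw [ih]
      constructor
      · exact Or.inr
      · rintro (rfl | hm)
        · simp at h
        · exact hm
theorem pvVDaux (vl : List String) : ∀ (k : Nat) (nl : List String)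
    (acc : PySem.Dict String String), vl.length + k ≤ nl.length →
    (PySem.List.enumerate vl (k : Int)).foldl
        (fun vd p => PySem.Dict.insert vd (PySem.List.pyGetD nl p.1 "") (PySem.Str.strip p.2)) acc =
      ((nl.drop k).zip vl).foldl (fun vd p => PySem.Dict.insert vd p.1 (PySem.Str.strip p.2)) acc := by
  induction vl with
  | nil => intro k nl acc _; simp [PySem.List.enumerate]
  | cons v t ih =>
    intro k nl acc h
    have hk : k < nl.length := by simp at h; omega
    rw [show PySem.List.enumerate (v :: t) (k : Int) = ((k : Int), v) :: PySem.List.enumerate t ((k : Int) + 1) by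
      simp [PySem.List.enumerate]]
    rw [List.drop_eq_getElem_cons hk]
    simp only [List.zip_cons_cons, List.foldl_cons]
    rw [PySem.List.pyGetD_natCast, List.getD_eq_getElem nl "" hk]
    have : ((k : Int) + 1) = ((k + 1 : Nat) : Int) := by push_cast; ring
    rw [this, ih (k + 1) nl _ (by simp at h ⊢; omega)]
theorem pvVD (nl vl : List String) (h : vl.length ≤ nl.length)
    (acc : PySem.Dict String String) :
    (PySem.List.enumerate vl).foldl
        (fun vd p => PySem.Dict.insert vd (PySem.List.pyGetD nl p.1 "") (PySem.Str.strip p.2)) acc =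
      (nl.zip vl).foldl (fun vd p => PySem.Dict.insert vd p.1 (PySem.Str.strip p.2)) acc := by
  have := pvVDaux vl 0 nl acc (by omega)
  simpa using this
-- A's inner dict equals Source B's dict(zip(namelist, stripped values))
theorem pvInnerEq (nl vl : List String) (h : vl.length ≤ nl.length) :
    (PySem.List.enumerate vl).foldl
        (fun vd p => PySem.Dict.insert vd (PySem.List.pyGetD nl p.1 "") (PySem.Str.strip p.2))
        (PySem.Dict.empty) =
      PySem.Dict.ofList (nl.zip (vl.map PySem.Str.strip)) := by
  rw [pvVD nl vl h, PySem.Dict.ofList, PySem.Dict.update, List.zip_map_right, List.foldl_map]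
  rfl
theorem pvRangePairwiseGen : ∀ (n : Nat) (a : Int), (PySem.List.pyRange a (a + (n : Int)) 1).Pairwise (· < ·) := by
  intro n
  induction n with
  | zero =>
    intro a
    have h : PySem.List.pyRange a (a + ((0 : Nat) : Int)) 1 = [] := by
      simp [PySem.List.pyRange]
    rw [h]
    exact List.Pairwise.nil
  | succ k ih =>
    intro a
    rw [PySem.List.pyRange_one_cons (by push_cast; omega : a < a + ((k + 1 : Nat) : Int))]
    constructor
    · intro x hx
      rw [PySem.List.mem_pyRange_one] at hx
      omega
    · have h := ih (a + 1)
      rw [show a + 1 + ((k : Nat) : Int) = a + ((k + 1 : Nat) : Int) by push_cast; ring] at h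
      exact h
theorem pvRangePairwise : (PySem.List.pyRange 1 9999 1).Pairwise (· < ·) := by
  have h := pvRangePairwiseGen 9998 1
  norm_num at h
  exact h
-- the predicate/value abbreviations used to normalise both sides
def pvCond (nl : List String) (cd : PySem.Dict String (List String)) (k : String) : Bool :=
  decide ((PySem.Dict.getD cd k []).length > 0) &&
    [(nl.length : Int), (nl.length : Int) - 1, (nl.length : Int) - 2].contains ((PySem.Dict.getD cd k []).length : Int)
def pvSub (nl : List String) (cd : PySem.Dict String (List String)) (k : String) : PySem.Dict String String :=
  PySem.Dict.ofList (nl.zip ((PySem.Dict.getD cd k []).map PySem.Str.strip))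
-- A's fold collapses to a plain insert-fold over the indices passing pvCond
theorem pvAFoldFilter (nl : List String) (cd : PySem.Dict String (List String)) :
    ∀ (l : List Int) (acc : PySem.Dict String (PySem.Dict String String)),
      l.foldl (fun para i =>
        let valuelist := PySem.Dict.getD cd (PySem.Int.toStr i) []
        if valuelist.length > 0 then
          if !([(nl.length : Int), (nl.length : Int) - 1, (nl.length : Int) - 2].contains (valuelist.length : Int)) then
            para
          else
            let valuedict := (PySem.List.enumerate valuelist).foldl
              (fun vd p => PySem.Dict.insert vd (PySem.List.pyGetD nl p.1 "") (PySem.Str.strip p.2))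
              (PySem.Dict.empty)
            PySem.Dict.insert para (PySem.Int.toStr i) valuedict
        else para) acc =
      (l.filter (fun i => pvCond nl cd (PySem.Int.toStr i))).foldl
        (fun d i => d.insert (PySem.Int.toStr i) (pvSub nl cd (PySem.Int.toStr i))) acc := by
  intro l
  induction l with
  | nil => intro acc; simp
  | cons i t ih =>
    intro acc
    rw [List.foldl_cons, List.filter_cons]
    by_cases h0 : (PySem.Dict.getD cd (PySem.Int.toStr i) []).length > 0
    · by_cases hc : ([(nl.length : Int), (nl.length : Int) - 1, (nl.length : Int) - 2].contains
          ((PySem.Dict.getD cd (PySem.Int.toStr i) []).length : Int)) = true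
      · have hcond : pvCond nl cd (PySem.Int.toStr i) = true := by
          simp only [pvCond, Bool.and_eq_true, decide_eq_true_eq]
          exact ⟨h0, hc⟩
        simp only [hcond, if_true, List.foldl_cons]
        rw [← ih]
        simp only [h0, if_true, hc, Bool.not_true, Bool.false_eq_true, if_false]
        congr 2
        have hb : (PySem.Dict.getD cd (PySem.Int.toStr i) []).length ≤ nl.length := by
          have h' := hc
          simp only [List.contains_eq_mem, List.mem_cons, List.not_mem_nil, or_false,
            decide_eq_true_eq] at h'
          rcases h' with h | h | h <;> omega
        exact pvInnerEq nl _ hb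
      · have hcf : ([(nl.length : Int), (nl.length : Int) - 1, (nl.length : Int) - 2].contains
            ((PySem.Dict.getD cd (PySem.Int.toStr i) []).length : Int)) = false := by
          rw [← Bool.not_eq_true]; exact hc
        have hcond : pvCond nl cd (PySem.Int.toStr i) = false := by
          simp only [pvCond, Bool.and_eq_false_iff]
          exact Or.inr hcf
        simp only [hcond, Bool.false_eq_true, if_false]
        rw [← ih]
        congr 1
        simp only [h0, if_true, hcf, Bool.not_false, if_true]
    · have hcond : pvCond nl cd (PySem.Int.toStr i) = false := by
        simp only [pvCond, Bool.and_eq_false_iff]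
        exact Or.inl (by simpa using h0)
      simp only [hcond, Bool.false_eq_true, if_false]
      rw [← ih]
      congr 1
      simp only [h0, Bool.false_eq_true, if_false]
-- B's append-fold is a filterMap over the items
def pvG (nl : List String) (p : String × List String) : Option (Int × String × PySem.Dict String String) :=
  match pvParseIndex p.1 with
  | none => none
  | some n =>
    if p.2.length = 0 then none
    else if [(nl.length : Int), (nl.length : Int) - 1, (nl.length : Int) - 2].contains ((p.2.length : Int)) then
      some (n, p.1, PySem.Dict.ofList (nl.zip (p.2.map PySem.Str.strip)))
    else none
theorem pvBFoldFilterMap (nl : List String) :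
    ∀ (l : List (String × List String)) (acc : List (Int × String × PySem.Dict String String)),
      l.foldl (fun acc p =>
        match pvParseIndex p.1 with
        | none => acc
        | some n =>
          if p.2.length = 0 then acc
          else if [(nl.length : Int), (nl.length : Int) - 1, (nl.length : Int) - 2].contains ((p.2.length : Int)) then
            acc ++ [(n, p.1, PySem.Dict.ofList (nl.zip (p.2.map PySem.Str.strip)))]
          else acc) acc =
      acc ++ l.filterMap (pvG nl) := by
  intro l
  induction l with
  | nil => intro acc; simp
  | cons p t ih =>
    intro acc
    have hGe : pvG nl p = (match pvParseIndex p.1 with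
      | none => none
      | some n =>
        if p.2.length = 0 then none
        else if [(nl.length : Int), (nl.length : Int) - 1, (nl.length : Int) - 2].contains ((p.2.length : Int)) then
          some (n, p.1, PySem.Dict.ofList (nl.zip (p.2.map PySem.Str.strip)))
        else none) := rfl
    rw [List.foldl_cons, List.filterMap_cons, hGe]
    rcases hp : pvParseIndex p.1 with _ | n
    · exact ih acc
    · by_cases h0 : p.2.length = 0
      · dsimp only
        rw [if_pos h0, if_pos h0]
        exact ih acc
      · by_cases hc : ([(nl.length : Int), (nl.length : Int) - 1, (nl.length : Int) - 2].contains ((p.2.length : Int))) = true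
        · dsimp only
          rw [if_neg h0, if_neg h0, if_pos hc, if_pos hc, ih]
          simp
        · rw [Bool.not_eq_true] at hc
          dsimp only
          rw [if_neg h0, if_neg h0, hc]
          simp only [Bool.false_eq_true, if_false]
          exact ih acc
-- the key fact: B's collected triples are a permutation of A's accepted indices, and sorting
-- them by the parsed index reproduces A's numeric scan order
theorem pvSortedEntries (nl : List String) (cd0 : List (String × List String)) :
    PySem.List.sorted ((pvItems cd0).filterMap (pvG nl)) (fun e => e.1) =
      ((PySem.List.pyRange 1 9999 1).filter
          (fun i => pvCond nl (PySem.Dict.mk cd0) (PySem.Int.toStr i))).map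
        (fun i => (i, PySem.Int.toStr i, pvSub nl (PySem.Dict.mk cd0) (PySem.Int.toStr i))) := by
  have hLA : ((PySem.List.pyRange 1 9999 1).filter
      (fun i => pvCond nl (PySem.Dict.mk cd0) (PySem.Int.toStr i))).Pairwise (· < ·) :=
    pvRangePairwise.filter _
  have hmemLA : ∀ i ∈ (PySem.List.pyRange 1 9999 1).filter
      (fun i => pvCond nl (PySem.Dict.mk cd0) (PySem.Int.toStr i)), 1 ≤ i ∧ i ≤ 9998 := by
    intro i hi
    have := (List.mem_filter.mp hi).1
    rw [PySem.List.mem_pyRange_one] at this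
    omega
  have hpair : (((PySem.List.pyRange 1 9999 1).filter
      (fun i => pvCond nl (PySem.Dict.mk cd0) (PySem.Int.toStr i))).map
        (fun i => (i, PySem.Int.toStr i, pvSub nl (PySem.Dict.mk cd0) (PySem.Int.toStr i)))).Pairwise
      (fun a b => a.1 < b.1) := by
    rw [List.pairwise_map]
    exact hLA
  apply PySem.List.sorted_eq_of_perm_of_pairwise_lt _ _ _ ?_ hpair
  -- permutation via nodup + same membership
  have hys : (((PySem.List.pyRange 1 9999 1).filter
      (fun i => pvCond nl (PySem.Dict.mk cd0) (PySem.Int.toStr i))).map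
        (fun i => (i, PySem.Int.toStr i, pvSub nl (PySem.Dict.mk cd0) (PySem.Int.toStr i)))).Nodup :=
by
    have hirr : Std.Irrefl (fun (a b : Int × String × PySem.Dict String String) => a.1 < b.1) :=
      ⟨fun a => lt_irrefl _⟩
    exact hpair.nodup
  have hitems : (pvItems cd0).filterMap (pvG nl) =
      (PySem.List.dedup (cd0.map Prod.fst)).filterMap
        ((pvG nl) ∘ (fun k => (k, PySem.Dict.getD (PySem.Dict.mk cd0) k []))) := by
    rw [pvItems, List.filterMap_map]
  have hkey : ∀ (k : String) (e : Int × String × PySem.Dict String String),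
      ((pvG nl) ∘ (fun k => (k, PySem.Dict.getD (PySem.Dict.mk cd0) k []))) k = some e → e.2.1 = k := by
    intro k e h
    simp only [Function.comp, pvG] at h
    rcases hp : pvParseIndex k with _ | n
    · rw [hp] at h; exact absurd h (by simp)
    · rw [hp] at h
      dsimp only at h
      by_cases h0 : (PySem.Dict.getD (PySem.Dict.mk cd0) k []).length = 0
      · rw [if_pos h0] at h; exact absurd h (by simp)
      · rw [if_neg h0] at h
        by_cases hc : ([(nl.length : Int), (nl.length : Int) - 1, (nl.length : Int) - 2].contains
            (((PySem.Dict.getD (PySem.Dict.mk cd0) k []).length : Int))) = true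
        · rw [if_pos hc] at h
          simp only [Option.some.injEq] at h
          rw [← h]
        · rw [Bool.not_eq_true] at hc
          rw [hc] at h
          exact absurd h (by simp)
  have hxs : ((pvItems cd0).filterMap (pvG nl)).Nodup := by
    rw [hitems]
    apply List.Nodup.filterMap
    · intro a a' b hb hb'
      rw [← hkey a b hb, ← hkey a' b hb']
    · exact PySem.Set.nodup_ofList _
  rw [List.perm_ext_iff_of_nodup hys hxs]
  intro e
  rw [List.mem_map, hitems, List.mem_filterMap]
  constructor
  · rintro ⟨i, hi, rfl⟩
    obtain ⟨h1, h2⟩ := hmemLA i hi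
    have hcond := (List.mem_filter.mp hi).2
    simp only [pvCond, Bool.and_eq_true, decide_eq_true_eq] at hcond
    refine ⟨PySem.Int.toStr i, ?_, ?_⟩
    · rw [PySem.List.dedup, PySem.Set.mem_ofList, ← pvGetIsSome]
      rw [PySem.Dict.getD_eq_get?_getD] at hcond
      rcases hq : (PySem.Dict.mk cd0).get? (PySem.Int.toStr i) with _ | v
      · rw [hq] at hcond; simp at hcond
      · simp [hq]
    · simp only [Function.comp, pvG]
      rw [(pvParseIff _ _).mpr ⟨h1, h2, rfl⟩]
      dsimp only
      rw [if_neg (Nat.pos_iff_ne_zero.mp hcond.1), if_pos hcond.2]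
      rfl
  · rintro ⟨k, hk, hg⟩
    simp only [Function.comp, pvG] at hg
    rcases hp : pvParseIndex k with _ | n
    · rw [hp] at hg; exact absurd hg (by simp)
    · rw [hp] at hg
      dsimp only at hg
      by_cases h0 : (PySem.Dict.getD (PySem.Dict.mk cd0) k []).length = 0
      · rw [if_pos h0] at hg; exact absurd hg (by simp)
      · rw [if_neg h0] at hg
        by_cases hc : ([(nl.length : Int), (nl.length : Int) - 1, (nl.length : Int) - 2].contains
            (((PySem.Dict.getD (PySem.Dict.mk cd0) k []).length : Int))) = true
        · rw [if_pos hc] at hg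
          simp only [Option.some.injEq] at hg
          obtain ⟨h1, h2, hks⟩ := (pvParseIff k n).mp hp
          refine ⟨n, ?_, ?_⟩
          · rw [List.mem_filter, PySem.List.mem_pyRange_one]
            refine ⟨⟨h1, by omega⟩, ?_⟩
            simp only [pvCond, hks, Bool.and_eq_true, decide_eq_true_eq]
            exact ⟨Nat.pos_of_ne_zero h0, hc⟩
          · rw [← hg, hks]
            rfl
        · rw [Bool.not_eq_true] at hc
          rw [hc] at hg
          exact absurd hg (by simp)
-- A's accumulated dict has fresh distinct keys, so its items are the mapped filtered range
theorem pvAItems (nl : List String) (cd0 : List (String × List String)) :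
    (((PySem.List.pyRange 1 9999 1).filter (fun i => pvCond nl (PySem.Dict.mk cd0) (PySem.Int.toStr i))).foldl
        (fun d i => d.insert (PySem.Int.toStr i) (pvSub nl (PySem.Dict.mk cd0) (PySem.Int.toStr i)))
        (PySem.Dict.empty)).items =
      ((PySem.List.pyRange 1 9999 1).filter (fun i => pvCond nl (PySem.Dict.mk cd0) (PySem.Int.toStr i))).map
        (fun i => (PySem.Int.toStr i, pvSub nl (PySem.Dict.mk cd0) (PySem.Int.toStr i))) := by
  have hmem : ∀ i ∈ (PySem.List.pyRange 1 9999 1).filter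
      (fun i => pvCond nl (PySem.Dict.mk cd0) (PySem.Int.toStr i)), 1 ≤ i ∧ i ≤ 9998 := by
    intro i hi
    have := (List.mem_filter.mp hi).1
    rw [PySem.List.mem_pyRange_one] at this
    omega
  have hnd : (((PySem.List.pyRange 1 9999 1).filter
      (fun i => pvCond nl (PySem.Dict.mk cd0) (PySem.Int.toStr i))).map (fun i => PySem.Int.toStr i)).Nodup := by
    have hfn : ((PySem.List.pyRange 1 9999 1).filter
        (fun i => pvCond nl (PySem.Dict.mk cd0) (PySem.Int.toStr i))).Nodup :=
      (pvRangePairwise.filter _).nodup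
    rw [List.nodup_map_iff_inj_on hfn]
    intro a ha b hb hab
    exact pvToStrInj (hmem a ha).1 (hmem a ha).2 (hmem b hb).1 (hmem b hb).2 hab
  have := PySem.Dict.items_foldl_insert_fresh
    ((PySem.List.pyRange 1 9999 1).filter (fun i => pvCond nl (PySem.Dict.mk cd0) (PySem.Int.toStr i)))
    (fun i => PySem.Int.toStr i)
    (fun i => pvSub nl (PySem.Dict.mk cd0) (PySem.Int.toStr i))
    PySem.Dict.empty
    (fun a _ => PySem.Dict.contains_empty _)
    hnd
  exact this.trans (List.nil_append _)

-- ===== VERDICT (by name: the statement is the Claim_ definition above) =====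
theorem assign_parameterlist_spec : Claim_equal_assign_parameterlist := by
  intro namelist confdict _
  unfold Spec_assign_parameterlist assign_parameterlist assign_parameterlist_alt
  dsimp only
  rw [pvAFoldFilter, pvAItems, pvBFoldFilterMap, List.nil_append, pvSortedEntries, List.map_map,
    List.map_map]
  apply List.map_congr_left
  intro a _
  rfl
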